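-- pv_equiv track=rewrite | github.com/audrms6494/data_structure | assignment3.py | search_path_DP
-- ===== SOURCE A (Python) =====
-- def search_path_DP(y, x):
--     """
--     This function finds the number of shortest paths to the target location using dynamic programming.
--
--     Args:
--         y (int): y-coordinate of the target location.
--         x (int): x-coordinate of the target location.
--
--     Return:
--         (int): The number of shortest paths.
--
--     """
--     ### CODE HERE ###
--     dp = []
--     for num in range(x*y):
--         if num < y:  # base - 집의 좌표가 x == 1일 때
--             dp.append(1)
--         elif num % y == 0:  # base - 집의 좌표가 y == 1일때
--             dp.append(1)
--         else:
--             dp.append(dp[num-y] + dp[num-1])  # dp method - 점화식 사용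
--     return dp[x*y-1]
-- ===== SOURCE B (Python) =====
-- def search_path_DP(y, x):
--     # number of monotone lattice paths to (y, x) = C(x + y - 2, y - 1),
--     # computed by the incremental product C(n, k) = prod_{i=1..k} (n - k + i) / i
--     n = x + y - 2
--     k = y - 1
--     num = 1
--     for i in range(1, k + 1):
--         num = num * (n - k + i) // i
--     return num
-- ===== Notes on version B (the rewrite author's own statement) =====
-- stated objective: faster
-- what changed: Replaced the O(x*y) dynamic-programming table with the closed-form binomial coefficient C(x+y-2, y-1) computed by an O(y) incremental product with exact integer division.
import Mathlib
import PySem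

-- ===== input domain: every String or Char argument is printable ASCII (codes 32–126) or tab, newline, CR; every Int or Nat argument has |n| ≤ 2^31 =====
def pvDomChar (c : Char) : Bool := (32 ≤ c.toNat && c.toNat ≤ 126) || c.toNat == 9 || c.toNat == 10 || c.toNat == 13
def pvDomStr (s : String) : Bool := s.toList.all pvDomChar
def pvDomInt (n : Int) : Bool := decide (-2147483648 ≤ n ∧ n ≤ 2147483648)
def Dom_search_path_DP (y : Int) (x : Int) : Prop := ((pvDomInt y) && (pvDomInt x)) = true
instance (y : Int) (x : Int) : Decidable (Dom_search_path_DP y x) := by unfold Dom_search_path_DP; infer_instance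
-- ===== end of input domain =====

-- B replaces A's dynamic-programming table by the closed-form binomial coefficient
-- C(x+y-2, y-1) computed with an incremental product (objective: faster).

-- ===== PORT A =====
-- dp is a growing list; we carry it as an Array (Python's list.append is O(1)) and read it
-- with exact Python indexing: arrGetD applies the same index rule as PySem.List.pyGetD.
def arrGetD (a : Array Int) (i : Int) (d : Int) : Int :=
  ((PySem.List.pyIdx? a.size i).bind (fun k => a[k]?)).getD d

def search_path_DP (y : Int) (x : Int) : Int :=
  let dp := (PySem.List.pyRange 0 (x * y) 1).foldl (fun dp num =>
      if num < y then dp.push (1 : Int)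
      else if PySem.Int.mod num y = 0 then dp.push (1 : Int)
      else dp.push (arrGetD dp (num - y) 0 + arrGetD dp (num - 1) 0)) (#[] : Array Int)
  arrGetD dp (x * y - 1) 0

-- ===== PORT B =====
def search_path_DP_alt (y : Int) (x : Int) : Int :=
  let n := x + y - 2
  let k := y - 1
  (PySem.List.pyRange 1 (k + 1) 1).foldl (fun num i => PySem.Int.floordiv (num * (n - k + i)) i) 1

-- ===== PRECONDITION & SPEC =====
-- Pre_ admits exactly the inputs on which the Python A returns normally: the natural domain
-- 1 ≤ y ∧ 1 ≤ x, plus the degenerate corner y = -1 ∧ x ≤ -1 (where A returns 1, and so does B);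
-- on every other input A raises IndexError (dp[-1] on an empty dp, or dp[num-y] beyond the list).
def Pre_search_path_DP (y : Int) (x : Int) : Prop :=
  (1 ≤ y ∧ 1 ≤ x) ∨ (y = -1 ∧ x ≤ -1)
instance (y : Int) (x : Int) : Decidable (Pre_search_path_DP y x) := by
  unfold Pre_search_path_DP; infer_instance

def pvWitness_search_path_DP : Int × Int := (3, 4)

def Spec_search_path_DP (y : Int) (x : Int) (out : Int) : Prop := out = search_path_DP_alt y x
instance (y : Int) (x : Int) (out : Int) : Decidable (Spec_search_path_DP y x out) := by
  unfold Spec_search_path_DP; infer_instance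

-- ===== CLAIM (what is proved, stated in full; the proofs are below) =====
def Claim_equal_search_path_DP : Prop := ∀ (y : Int) (x : Int), Dom_search_path_DP y x → Pre_search_path_DP y x → Spec_search_path_DP y x (search_path_DP y x)

-- ===== LEMMAS AND PROOFS =====

-- B's product loop computes the binomial coefficient: after the i = 1 .. j prefix the
-- accumulator is C(n - k + j, j) (the division is exact at every step); induction on j.
lemma prodB (n k j : Nat) (hj : j ≤ k) (hk : k ≤ n) :
    (PySem.List.pyRange 1 ((j : Int) + 1) 1).foldl
      (fun num i => PySem.Int.floordiv (num * ((n : Int) - (k : Int) + i)) i) 1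
    = (Nat.choose (n - k + j) j : Int) := by
  induction j with
  | zero => simp [PySem.List.pyRange_one_eq_nil]
  | succ j ih =>
    have h1 : (((j + 1 : Nat) : Int) + 1) = ((j : Int) + 1) + 1 := by push_cast; ring
    rw [h1, PySem.List.pyRange_one_succ_right (by omega), List.foldl_append, ih (by omega)]
    simp only [List.foldl_cons, List.foldl_nil]
    have hm : (n : Int) - (k : Int) + ((j : Int) + 1) = ((n - k + j + 1 : Nat) : Int) := by
      push_cast; omega
    have hch : (Nat.choose (n - k + j) j) * (n - k + j + 1) = Nat.choose (n - k + (j+1)) (j+1) * (j+1) := by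
      have h := Nat.add_one_mul_choose_eq (n - k + j) j
      rw [Nat.mul_comm]
      simpa [Nat.succ_eq_add_one, Nat.add_assoc] using h
    rw [hm]
    have : ((Nat.choose (n - k + j) : Nat → Nat) j : Int) * ((n - k + j + 1 : Nat) : Int)
        = ((Nat.choose (n - k + (j+1)) (j+1) * (j+1) : Nat) : Int) := by
      push_cast [← hch]; ring
    rw [this]
    have := PySem.Int.floordiv_natCast (Nat.choose (n - k + (j+1)) (j+1) * (j+1)) (j+1)
    rw [show ((j : Int) + 1) = ((j + 1 : Nat) : Int) by push_cast; ring, this,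
        Nat.mul_div_cancel _ (by omega)]

-- the value A's dp stores at cell num (column-major table with column height Y)
def dpVal (Y num : Nat) : Int := (Nat.choose (num / Y + num % Y) (num % Y) : Int)

-- Pascal's rule in dp coordinates: dp[num-Y] + dp[num-1] = dp[num] off the two base rows
lemma pascalStep (Y t : Nat) (hY : 1 ≤ Y) (hty : Y ≤ t) (hr : t % Y ≠ 0) :
    dpVal Y (t - Y) + dpVal Y (t - 1) = dpVal Y t := by
  set q := t / Y with hq
  set r := t % Y with hrdef
  have hqr : Y * q + r = t := Nat.div_add_mod t Y
  have hrY : r < Y := Nat.mod_lt _ (by omega)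
  have hq1 : 1 ≤ q := (Nat.one_le_div_iff (by omega)).mpr hty
  have h1 : (t - Y) % Y = r := by rw [← Nat.mod_eq_sub_mod hty]
  have h2 : (t - Y) / Y = q - 1 := by
    have := Nat.div_eq_sub_div (show 0 < Y by omega) hty
    omega
  have htm1 : t - 1 = (r - 1) + Y * q := by omega
  have h3 : (t - 1) % Y = r - 1 := by
    rw [htm1, Nat.add_mul_mod_self_left, Nat.mod_eq_of_lt (by omega)]
  have h4 : (t - 1) / Y = q := by
    rw [htm1, Nat.add_mul_div_left _ _ (show 0 < Y by omega),
        Nat.div_eq_of_lt (by omega)]; omega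
  unfold dpVal
  rw [h1, h2, h3, h4]
  have hp := Nat.choose_succ_succ (q + r - 1) (r - 1)
  have e1 : (q + r - 1).succ = q + r := by omega
  have e2 : (r - 1).succ = r := by omega
  rw [e1, e2] at hp
  have e3 : q - 1 + r = q + r - 1 := by omega
  have e4 : q + (r - 1) = q + r - 1 := by omega
  rw [e3, e4, hp]
  push_cast
  ring

-- A's fold builds exactly the table of binomials, by induction on the range bound.
lemma dpA (Y : Nat) (hY : 1 ≤ Y) (t : Nat) :
    (PySem.List.pyRange 0 (t : Int) 1).foldl (fun dp num =>
      if num < (Y : Int) then dp ++ [(1 : Int)]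
      else if PySem.Int.mod num (Y : Int) = 0 then dp ++ [(1 : Int)]
      else dp ++ [PySem.List.pyGetD dp (num - (Y : Int)) 0 + PySem.List.pyGetD dp (num - 1) 0]) []
    = (List.range t).map (dpVal Y) := by
  induction t with
  | zero => simp [PySem.List.pyRange_one_eq_nil]
  | succ t ih =>
    rw [show ((t + 1 : Nat) : Int) = (t : Int) + 1 by push_cast; ring,
        PySem.List.pyRange_one_succ_right (by omega), List.foldl_append, ih,
        List.range_succ, List.map_append, List.map_cons, List.map_nil]
    simp only [List.foldl_cons, List.foldl_nil]
    by_cases ht : t < Y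
    · rw [if_pos (by exact_mod_cast ht)]
      have : dpVal Y t = 1 := by
        simp [dpVal, Nat.div_eq_of_lt ht, Nat.mod_eq_of_lt ht]
      rw [this]
    · rw [if_neg (by exact_mod_cast ht)]
      by_cases hr : t % Y = 0
      · rw [if_pos (by rw [PySem.Int.mod_natCast, hr]; rfl)]
        have : dpVal Y t = 1 := by simp [dpVal, hr]
        rw [this]
      · rw [if_neg (by rw [PySem.Int.mod_natCast]; exact_mod_cast hr)]
        have hYt : Y ≤ t := by omega
        have i1 : (t : Int) - (Y : Int) = ((t - Y : Nat) : Int) := by push_cast [hYt]; ring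
        have i2 : (t : Int) - 1 = ((t - 1 : Nat) : Int) := by
          have : 1 ≤ t := by omega
          push_cast [this]; ring
        rw [i1, i2, PySem.List.pyGetD_natCast, PySem.List.pyGetD_natCast,
            List.getD_eq_getElem?_getD]
        rw [List.getD_eq_getElem?_getD]
        rw [show ((List.range t).map (dpVal Y))[(t - Y : Nat)]? = some (dpVal Y (t - Y)) by
              simp [List.getElem?_map, List.getElem?_range (show t - Y < t by omega)],
            show ((List.range t).map (dpVal Y))[(t - 1 : Nat)]? = some (dpVal Y (t - 1)) by
              simp [List.getElem?_map, List.getElem?_range (show t - 1 < t by omega)]]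
        simp [pascalStep Y t hY hYt hr]

-- the degenerate corner y = -1: num % -1 == 0 always, so every step appends 1
lemma dpNeg (l : List Int) (acc : List Int)
    (h : ∀ num ∈ l, (0 : Int) ≤ num) :
    l.foldl (fun dp num =>
      if num < (-1 : Int) then dp ++ [(1 : Int)]
      else if PySem.Int.mod num (-1 : Int) = 0 then dp ++ [(1 : Int)]
      else dp ++ [PySem.List.pyGetD dp (num - (-1 : Int)) 0 + PySem.List.pyGetD dp (num - 1) 0]) acc
    = acc ++ List.replicate l.length 1 := by
  induction l generalizing acc with
  | nil => simp
  | cons a l ih =>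
    have ha : (0 : Int) ≤ a := h a (by simp)
    rw [List.foldl_cons, if_neg (by omega),
        if_pos (by rw [PySem.Int.mod_eq_zero_iff_dvd]; exact ⟨-a, by ring⟩),
        ih _ (fun num hn => h num (by simp [hn]))]
    simp [List.replicate_succ]

-- reading an Array with Python's index rule = reading its list
lemma arrGetD_eq (a : Array Int) (i d : Int) :
    arrGetD a i d = PySem.List.pyGetD a.toList i d := by
  unfold arrGetD PySem.List.pyGetD PySem.List.pyGet?
  simp [← Array.getElem?_toList]

-- the Array-carrying fold of port A computes (as a list) the list-carrying fold
lemma foldA_eq (y : Int) (l : List Int) (acc : Array Int) :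
    (l.foldl (fun dp num =>
      if num < y then dp.push (1 : Int)
      else if PySem.Int.mod num y = 0 then dp.push (1 : Int)
      else dp.push (arrGetD dp (num - y) 0 + arrGetD dp (num - 1) 0)) acc).toList
    = l.foldl (fun dp num =>
      if num < y then dp ++ [(1 : Int)]
      else if PySem.Int.mod num y = 0 then dp ++ [(1 : Int)]
      else dp ++ [PySem.List.pyGetD dp (num - y) 0 + PySem.List.pyGetD dp (num - 1) 0]) acc.toList := by
  induction l generalizing acc with
  | nil => rfl
  | cons a l ih =>
    simp only [List.foldl_cons]
    rw [ih]
    congr 1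
    split_ifs <;> simp [arrGetD_eq]

-- ===== VERDICT (by name: the statement is the Claim_ definition above) =====
theorem search_path_DP_spec : Claim_equal_search_path_DP := by
  intro y x _ hpre
  unfold Spec_search_path_DP
  rcases hpre with ⟨hy, hx⟩ | ⟨rfl, hx⟩
  · obtain ⟨Y, rfl⟩ : ∃ Y : Nat, y = (Y : Int) := ⟨y.toNat, (Int.toNat_of_nonneg (by omega)).symm⟩
    obtain ⟨X, rfl⟩ : ∃ X : Nat, x = (X : Int) := ⟨x.toNat, (Int.toNat_of_nonneg (by omega)).symm⟩
    have hY : 1 ≤ Y := by exact_mod_cast hy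
    have hX : 1 ≤ X := by exact_mod_cast hx
    unfold search_path_DP search_path_DP_alt
    simp only []
    rw [arrGetD_eq, foldA_eq]
    show PySem.List.pyGetD _ _ _ = _
    -- A side: the table is the map of binomials, and the last cell is C((X-1)+(Y-1), Y-1)
    rw [show (X : Int) * (Y : Int) = ((X * Y : Nat) : Int) by push_cast; ring, dpA Y hY (X * Y)]
    have hXY : 0 < X * Y := Nat.mul_pos (by omega) (by omega)
    rw [show ((X * Y : Nat) : Int) - 1 = ((X * Y - 1 : Nat) : Int) by push_cast [hXY]; omega]
    rw [PySem.List.pyGetD_natCast, List.getD_eq_getElem?_getD,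
        show ((List.range (X * Y)).map (dpVal Y))[(X * Y - 1 : Nat)]? = some (dpVal Y (X * Y - 1)) by
          rw [List.getElem?_map, List.getElem?_range (show X * Y - 1 < X * Y by omega)]; rfl,
        Option.getD_some]
    -- B side: rewrite to prodB's shape with n = (X-1)+(Y-1), k = j = Y-1
    have efun : (fun (num i : Int) => PySem.Int.floordiv (num * ((X : Int) + (Y : Int) - 2 - ((Y : Int) - 1) + i)) i)
        = (fun (num i : Int) => PySem.Int.floordiv (num * ((((X - 1) + (Y - 1) : Nat) : Int) - (((Y - 1 : Nat)) : Int) + i)) i) := by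
      funext num i
      have : (X : Int) + (Y : Int) - 2 - ((Y : Int) - 1) + i
           = (((X - 1) + (Y - 1) : Nat) : Int) - (((Y - 1 : Nat)) : Int) + i := by
        push_cast [hX, hY]; ring
      rw [this]
    have erng : (Y : Int) - 1 + 1 = (((Y - 1 : Nat)) : Int) + 1 := by push_cast [hY]; ring
    rw [erng, efun, prodB ((X - 1) + (Y - 1)) (Y - 1) (Y - 1) le_rfl (by omega)]
    -- both sides are the same binomial
    have harg : X * Y - 1 = (Y - 1) + Y * (X - 1) := by
      obtain ⟨X', rfl⟩ : ∃ X', X = X' + 1 := ⟨X - 1, by omega⟩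
      simp only [Nat.add_sub_cancel]
      have h1 : (X' + 1) * Y = X' * Y + Y := by ring
      have h2 : Y * X' = X' * Y := by ring
      omega
    have hdiv : (X * Y - 1) / Y = X - 1 := by
      rw [harg, Nat.add_mul_div_left _ _ (show 0 < Y by omega), Nat.div_eq_of_lt (by omega)]
      omega
    have hmod : (X * Y - 1) % Y = Y - 1 := by
      rw [harg, Nat.add_mul_mod_self_left, Nat.mod_eq_of_lt (by omega)]
    simp only [dpVal, hdiv, hmod]
    norm_cast
    congr 1
    omega
  · unfold search_path_DP search_path_DP_alt
    simp only []
    rw [arrGetD_eq, foldA_eq]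
    show PySem.List.pyGetD _ _ _ = _
    rw [show x * (-1) = -x from by ring]
    rw [dpNeg (PySem.List.pyRange 0 (-x) 1) [] (fun num hn => by
        have := (PySem.List.mem_pyRange_one.mp hn).1
        omega)]
    rw [PySem.List.pyRange_one_eq_nil (show (-1 : Int) - 1 + 1 ≤ 1 by omega), List.foldl_nil]
    rw [PySem.List.length_pyRange_one, List.nil_append]
    have h1 : 1 ≤ (-x - 0).toNat := by omega
    rw [show -x - 1 = ((((-x - 0).toNat - 1 : Nat)) : Int) by omega, PySem.List.pyGetD_natCast]
    simp [List.getD_eq_getElem?_getD, show x < 0 by omega]
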